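-- pv_equiv track=rewrite | github.com/pypi-data/pypi-mirror-264 | packages/ascend-deployer/ascend_deployer-5.0.6-py3-none-any.whl/ascend_deployer/downloader/pip_downloader.py | source_filter
-- ===== SOURCE A (Python) =====
-- def source_filter(index, version):
--     """
--     source_filter
--
--     :param index:
--     :param version:
--     :return:
--     """
--     pkg = ''
--     url = ''
--     for name, href in index.items():
--         if 'tar' in name or 'zip' in name:
--             if version in name:
--                 pkg = name
--                 url = href
--         else:
--             continue
--     return pkg, url
-- ===== SOURCE B (Python) =====
-- def source_filter(index, version):
--     """Reverse scan with early exit: the last forward match is the first reverse match."""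
--     for name, href in reversed(list(index.items())):
--         if ('tar' in name or 'zip' in name) and version in name:
--             return name, href
--     return '', ''
-- ===== Notes on version B (the rewrite author's own statement) =====
-- stated objective: alternative
-- what changed: Replaced the forward scan that overwrites pkg/url on every match with a reverse scan that returns the first match immediately (early exit).
import Mathlib
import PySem

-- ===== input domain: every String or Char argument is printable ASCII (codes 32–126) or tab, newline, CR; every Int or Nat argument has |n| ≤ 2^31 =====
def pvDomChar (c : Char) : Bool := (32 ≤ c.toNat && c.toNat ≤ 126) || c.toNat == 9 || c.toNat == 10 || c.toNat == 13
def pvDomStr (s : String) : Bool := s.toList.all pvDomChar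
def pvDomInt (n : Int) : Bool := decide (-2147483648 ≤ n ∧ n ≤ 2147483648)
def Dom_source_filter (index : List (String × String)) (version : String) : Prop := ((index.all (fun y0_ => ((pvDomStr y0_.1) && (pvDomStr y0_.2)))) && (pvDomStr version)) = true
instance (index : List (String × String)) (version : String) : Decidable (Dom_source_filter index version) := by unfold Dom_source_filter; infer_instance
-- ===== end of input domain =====

-- B replaces A's forward scan-and-overwrite with a reverse scan returning the first match (alternative decomposition, same cost).


-- ===== PORT A =====
-- forward scan: each matching entry overwrites (pkg, url); the last match wins
def source_filter (index : List (String × String)) (version : String) : String × String :=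
  index.foldl
    (fun s p =>
      if PySem.Str.isIn "tar" p.1 || PySem.Str.isIn "zip" p.1 then
        if PySem.Str.isIn version p.1 then (p.1, p.2) else s
      else s)
    ("", "")

-- ===== PORT B =====
-- early-return loop of Source B: first match found while scanning, else none
def sfFind (version : String) : List (String × String) → Option (String × String)
  | [] => none
  | p :: rest =>
    if (PySem.Str.isIn "tar" p.1 || PySem.Str.isIn "zip" p.1) && PySem.Str.isIn version p.1 then
      some (p.1, p.2)
    else sfFind version rest

def source_filter_alt (index : List (String × String)) (version : String) : String × String :=
  (sfFind version index.reverse).getD ("", "")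

-- ===== PRECONDITION & SPEC =====
def Spec_source_filter (index : List (String × String)) (version : String) (out : String × String) : Prop := out = source_filter_alt index version
instance (index : List (String × String)) (version : String) (out : String × String) : Decidable (Spec_source_filter index version out) := by unfold Spec_source_filter; infer_instance

-- ===== CLAIM (what is proved, stated in full; the proofs are below) =====
def Claim_equal_source_filter : Prop := ∀ (index : List (String × String)) (version : String), Dom_source_filter index version → Spec_source_filter index version (source_filter index version)

-- ===== LEMMAS AND PROOFS =====
theorem sf_foldl_eq_find (version : String) (xs : List (String × String)) :
    ∀ s : String × String,
      xs.foldl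
        (fun s p =>
          if PySem.Str.isIn "tar" p.1 || PySem.Str.isIn "zip" p.1 then
            if PySem.Str.isIn version p.1 then (p.1, p.2) else s
          else s)
        s
      = (sfFind version xs.reverse).getD s := by
  induction xs using List.reverseRecOn with
  | nil => intro s; rfl
  | append_singleton xs x ih =>
    intro s
    rw [List.foldl_append, List.reverse_append]
    simp only [List.reverse_cons, List.reverse_nil, List.nil_append, List.singleton_append,
      List.foldl_cons, List.foldl_nil, sfFind]
    by_cases h1 : (PySem.Str.isIn "tar" x.1 || PySem.Str.isIn "zip" x.1) = true <;>
      by_cases h2 : PySem.Str.isIn version x.1 = true <;>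
      simp_all

-- ===== VERDICT (by name: the statement is the Claim_ definition above) =====
theorem source_filter_spec : Claim_equal_source_filter := by
  intro index version _
  unfold Spec_source_filter source_filter source_filter_alt
  exact sf_foldl_eq_find version index ("", "")
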